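-- pv_equiv track=rewrite | github.com/dwadden/dygiepp | scripts/new-dataset/annotated_doc.py | merge_mult_splits
-- ===== SOURCE A (Python) =====
-- def merge_mult_splits(sents_to_join):
--     """
--     Given a list of sentence index pairs, determine if any represent multi-
--     joins (a sentence that was split into multiple fragments), and get the
--     first and last indices of the continuous split to join.
--
--     parameters:
--         sents_to_join, list of tuples: pairs of sentence indices
--
--     returns:
--         final_pairings, list of tuples: first and last indices of
--             continuous splits
--     """
--     # First sort by the first index
--     srtd = sorted(sents_to_join, key=lambda x: x[0])
--
--     # Do a common-sense check that the end indices don't overlap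
--     end_overlaps = [True if srtd[i][1] > srtd[i+1][0] else False
--                         for i in range(len(srtd) - 1)]
--     assert not any(end_overlaps), ('One or more pairs of sentences to join '
--                                     'overlaps another')
--
--     # Then get the indices where continuous joins stop
--     break_idxs = []
--     for i in range(len(srtd)-1):
--         if srtd[i][1] != srtd[i+1][0]:
--             break_idxs.append(i)
--     break_idxs = [-1] + break_idxs
--
--     # If the only break is at 0, we can just return the list
--     if break_idxs == [-1] and len(sents_to_join) == 1:
--         final_pairings = srtd
--         return final_pairings
--     else:
--         final_pairings = []
--
--     # Use break indices to get the start and end indices of continuous joins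
--     for i in range(len(break_idxs)):
--         if i == len(break_idxs) - 1:
--             cont_join = srtd[break_idxs[i]+1:]
--             cont_join = (cont_join[0][0], cont_join[-1][1])
--         else:
--             cont_join = srtd[break_idxs[i]+1: break_idxs[i+1]+1]
--             cont_join = (cont_join[0][0], cont_join[-1][1])
--
--         final_pairings.append(cont_join)
--
--     return final_pairings
-- ===== SOURCE B (Python) =====
-- def merge_mult_splits(sents_to_join):
--     """Single streaming merge over the sorted pairs (no break-index lists or slicing)."""
--     srtd = sorted(sents_to_join, key=lambda x: x[0])
--     cur_start, cur_end = srtd[0]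
--     final_pairings = []
--     for pair in srtd[1:]:
--         if pair[0] < cur_end:
--             raise AssertionError('One or more pairs of sentences to join '
--                                  'overlaps another')
--         elif pair[0] == cur_end:
--             cur_end = pair[1]
--         else:
--             final_pairings.append((cur_start, cur_end))
--             cur_start, cur_end = pair
--     final_pairings.append((cur_start, cur_end))
--     return final_pairings
-- ===== Notes on version B (the rewrite author's own statement) =====
-- stated objective: simpler
-- what changed: Replaced A's three passes (end-overlap comprehension, break-index list, then slicing between break indices) by one streaming merge over the sorted pairs that accumulates the current span directly.
import Mathlib
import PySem

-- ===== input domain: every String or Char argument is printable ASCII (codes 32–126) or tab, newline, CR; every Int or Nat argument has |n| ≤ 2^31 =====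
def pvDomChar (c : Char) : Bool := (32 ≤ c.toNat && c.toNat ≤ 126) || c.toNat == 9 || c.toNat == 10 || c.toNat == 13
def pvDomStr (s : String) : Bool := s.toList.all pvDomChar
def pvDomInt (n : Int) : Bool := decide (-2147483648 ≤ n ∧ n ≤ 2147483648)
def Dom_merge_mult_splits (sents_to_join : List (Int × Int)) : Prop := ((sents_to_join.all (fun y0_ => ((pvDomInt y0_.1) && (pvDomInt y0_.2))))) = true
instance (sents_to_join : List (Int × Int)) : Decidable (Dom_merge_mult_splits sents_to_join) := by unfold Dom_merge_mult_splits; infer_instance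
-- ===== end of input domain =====

-- B replaces A's break-index list and slicing passes by a single streaming merge over the
-- sorted pairs (objective: simpler). Inputs on which BOTH Pythons raise (empty list:
-- IndexError; overlapping sorted-adjacent pairs: AssertionError) are excluded by Pre_.

-- ===== PORT A =====
-- endpoints (cont_join[0][0], cont_join[-1][1]) of a cont_join slice
def aEnds (cont : List (Int × Int)) : Int × Int :=
  ((PySem.List.pyGetD cont 0 (0, 0)).1, (PySem.List.pyGetD cont (-1) (0, 0)).2)

-- body of A's final loop: the cont_join pair for loop index i over break list bl
def aSpanPair (srtd : List (Int × Int)) (bl : List Int) (i : Int) : Int × Int :=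
  aEnds
    (if i = (bl.length : Int) - 1 then
      PySem.List.slice srtd (some (PySem.List.pyGetD bl i 0 + 1)) none
    else
      PySem.List.slice srtd (some (PySem.List.pyGetD bl i 0 + 1))
        (some (PySem.List.pyGetD bl (i + 1) 0 + 1)))

def merge_mult_splits (sents_to_join : List (Int × Int)) : List (Int × Int) :=
  let srtd := PySem.List.sorted sents_to_join (fun p => p.1) false
  -- A's assert (end_overlaps) raises AssertionError exactly on inputs excluded by Pre_
  let break_idxs : List Int :=
    (PySem.List.pyRange 0 ((srtd.length : Int) - 1) 1).foldl
      (fun acc i =>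
        if decide ((PySem.List.pyGetD srtd i (0, 0)).2 ≠ (PySem.List.pyGetD srtd (i + 1) (0, 0)).1)
        then acc ++ [i] else acc) []
  let bl := (-1 : Int) :: break_idxs
  if bl = [-1] ∧ sents_to_join.length = 1 then srtd
  else (PySem.List.pyRange 0 (bl.length : Int) 1).foldl
         (fun acc i => acc ++ [aSpanPair srtd bl i]) []

-- ===== PORT B =====
-- B's for-loop over srtd[1:] with state (cur_start, cur_end, final_pairings)
def altGo : List (Int × Int) → Int → Int → List (Int × Int) → List (Int × Int)
  | [], cs, ce, acc => acc ++ [(cs, ce)]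
  | p :: rest, cs, ce, acc =>
    if p.1 < ce then acc                    -- AssertionError in Python B; excluded by Pre_
    else if p.1 = ce then altGo rest cs p.2 acc
    else altGo rest p.1 p.2 (acc ++ [(cs, ce)])

def merge_mult_splits_alt (sents_to_join : List (Int × Int)) : List (Int × Int) :=
  match PySem.List.sorted sents_to_join (fun p => p.1) false with
  | [] => []                                -- IndexError (srtd[0]) in Python B; excluded by Pre_
  | p :: rest => altGo rest p.1 p.2 []

-- ===== PRECONDITION & SPEC =====
-- Pre_ excludes exactly the inputs on which BOTH Pythons raise: the empty list (IndexError)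
-- and lists whose sorted adjacent pairs overlap (AssertionError).
def Pre_merge_mult_splits (sents_to_join : List (Int × Int)) : Prop :=
  sents_to_join ≠ [] ∧
  (∀ pr ∈ (PySem.List.sorted sents_to_join (fun p => p.1) false).zip
          (PySem.List.sorted sents_to_join (fun p => p.1) false).tail, pr.1.2 ≤ pr.2.1)
instance (sents_to_join : List (Int × Int)) : Decidable (Pre_merge_mult_splits sents_to_join) := by
  unfold Pre_merge_mult_splits; infer_instance

def pvWitness_merge_mult_splits : (List (Int × Int)) := [(3, 5), (0, 1), (1, 3)]

def Spec_merge_mult_splits (sents_to_join : List (Int × Int)) (out : List (Int × Int)) : Prop := out = merge_mult_splits_alt sents_to_join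
instance (sents_to_join : List (Int × Int)) (out : List (Int × Int)) : Decidable (Spec_merge_mult_splits sents_to_join out) := by unfold Spec_merge_mult_splits; infer_instance

-- ===== CLAIM (what is proved, stated in full; the proofs are below) =====
def Claim_equal_merge_mult_splits : Prop := ∀ (sents_to_join : List (Int × Int)), Dom_merge_mult_splits sents_to_join → Pre_merge_mult_splits sents_to_join → Spec_merge_mult_splits sents_to_join (merge_mult_splits sents_to_join)

-- ===== LEMMAS AND PROOFS =====

-- reference streaming merge (B's loop without the accumulator)
def gR : (Int × Int) → List (Int × Int) → List (Int × Int)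
  | (cs, ce), [] => [(cs, ce)]
  | (cs, ce), q :: r => if q.1 = ce then gR (cs, q.2) r else (cs, ce) :: gR q r

-- Nat-valued break indices of s (A's break_idxs without the -1 sentinel)
def NB (s : List (Int × Int)) : List Nat :=
  (List.range (s.length - 1)).filter
    (fun i => decide ((s.getD i (0, 0)).2 ≠ (s.getD (i + 1) (0, 0)).1))

-- the spans A's final loop produces, indexed by segment start n and remaining breaks
def PT (s : List (Int × Int)) : Nat → List Nat → List (Int × Int)
  | n, [] => [((s.getD n (0, 0)).1, (s.getD (s.length - 1) (0, 0)).2)]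
  | n, b :: bs => ((s.getD n (0, 0)).1, (s.getD b (0, 0)).2) :: PT s (b + 1) bs

def setFst (a : Int) : List (Int × Int) → List (Int × Int)
  | [] => []
  | (_, y) :: tl => (a, y) :: tl

-- adjacent non-overlap, recursively
def adj : List (Int × Int) → Prop
  | a :: b :: r => a.2 ≤ b.1 ∧ adj (b :: r)
  | _ => True

lemma adj_iff (s : List (Int × Int)) :
    adj s ↔ ∀ pr ∈ s.zip s.tail, pr.1.2 ≤ pr.2.1 := by
  match s with
  | [] => simp [adj]
  | [a] => simp [adj]
  | a :: b :: r =>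
    rw [adj, adj_iff (b :: r)]
    simp only [List.tail_cons, List.zip_cons_cons, List.mem_cons]
    constructor
    · rintro ⟨h1, h2⟩ pr (rfl | hpr); · exact h1
      exact h2 pr hpr
    · intro h; exact ⟨h _ (Or.inl rfl), fun pr hpr => h pr (Or.inr hpr)⟩

lemma altGo_eq : ∀ (l : List (Int × Int)) (cs ce : Int) (acc : List (Int × Int)),
    adj ((cs, ce) :: l) → altGo l cs ce acc = acc ++ gR (cs, ce) l
  | [], cs, ce, acc, _ => by simp [altGo, gR]
  | p :: rest, cs, ce, acc, h => by
    obtain ⟨h1, h2⟩ := h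
    rw [altGo, gR, if_neg (by omega)]
    by_cases he : p.1 = ce
    · rw [if_pos he, if_pos he, altGo_eq rest cs p.2 acc (by
        cases rest with
        | nil => trivial
        | cons q r => exact ⟨h2.1, h2.2⟩)]
    · rw [if_neg he, if_neg he, altGo_eq rest p.1 p.2 _ (by
        have h3 : adj (p :: rest) := h2
        cases rest with
        | nil => trivial
        | cons q r => exact h3)]
      simp

lemma gR_start : ∀ (l : List (Int × Int)) (a b e : Int),
    gR (a, e) l = setFst a (gR (b, e) l)
  | [], a, b, e => by simp [gR, setFst]
  | q :: r, a, b, e => by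
    rw [gR, gR]
    by_cases he : q.1 = e
    · rw [if_pos he, if_pos he, gR_start r a b q.2]
    · rw [if_neg he, if_neg he]; rfl

lemma PT_shift : ∀ (bs : List Nat) (x : Int × Int) (t : List (Int × Int)) (n : Nat),
    t ≠ [] → PT (x :: t) (n + 1) (bs.map (· + 1)) = PT t n bs
  | [], x, t, n, ht => by
    cases t with
    | nil => exact absurd rfl ht
    | cons h t' =>
      simp only [List.map_nil, PT, List.length_cons, Nat.add_sub_cancel, List.getD_cons_succ]
  | b :: bs, x, t, n, ht => by
    simp only [List.map_cons, PT, List.getD_cons_succ]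
    rw [PT_shift bs x t (b + 1) ht]

lemma PT_zero_shift : ∀ (bs : List Nat) (x : Int × Int) (t : List (Int × Int)),
    t ≠ [] → PT (x :: t) 0 (bs.map (· + 1)) = setFst x.1 (PT t 0 bs)
  | [], x, t, ht => by
    cases t with
    | nil => exact absurd rfl ht
    | cons h t' =>
      simp only [List.map_nil, PT, List.getD_cons_zero, setFst, List.length_cons,
        Nat.add_sub_cancel, List.getD_cons_succ]
  | b :: bs, x, t, ht => by
    simp only [List.map_cons, PT, List.getD_cons_zero, List.getD_cons_succ, setFst]
    rw [PT_shift bs x t (b + 1) ht]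

lemma NB_cons (x q : Int × Int) (r : List (Int × Int)) :
    NB (x :: q :: r) =
      (if x.2 ≠ q.1 then [0] else []) ++ (NB (q :: r)).map (· + 1) := by
  unfold NB
  simp only [List.length_cons, Nat.add_sub_cancel]
  rw [List.range_succ_eq_map, List.filter_cons, List.filter_map]
  rw [show ((fun i => decide (((x :: q :: r).getD i (0,0)).2 ≠ ((x :: q :: r).getD (i+1) (0,0)).1))
          ∘ Nat.succ)
        = (fun i => decide (((q :: r).getD i (0,0)).2 ≠ ((q :: r).getD (i+1) (0,0)).1))
      from funext fun i => rfl]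
  by_cases hx : x.2 = q.1
  · rw [if_neg (by simp [hx]), if_neg (by simp [hx])]
    rfl
  · rw [if_pos (by simp [hx]), if_pos (by simp [hx])]
    rfl

lemma NB_sorted (s : List (Int × Int)) : (NB s).Pairwise (· < ·) :=
  List.Pairwise.filter _ List.pairwise_lt_range

lemma NB_bounds (s : List (Int × Int)) : ∀ b ∈ NB s, b + 1 < s.length := by
  intro b hb
  have := List.mem_range.mp (List.mem_of_mem_filter hb : b ∈ List.range (s.length - 1))
  omega

lemma aEnds_mid (s : List (Int × Int)) (n m : Nat) (hnm : n ≤ m) (hm : m < s.length) :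
    aEnds (PySem.List.slice s (some (n:Int)) (some ((m:Int) + 1))) =
      ((s.getD n (0,0)).1, (s.getD m (0,0)).2) := by
  have h1 : ((m:Int) + 1) = ((m+1 : Nat) : Int) := by push_cast; ring
  rw [aEnds, h1, PySem.List.slice_natCast]
  set L := (s.drop n).take (m + 1 - n) with hL
  have hlen : L.length = m + 1 - n := by simp [hL]; omega
  have hne : L ≠ [] := by intro h; rw [h] at hlen; simp at hlen; omega
  rw [PySem.List.pyGetD_zero, PySem.List.pyGetD_neg_one L (0,0) hne]
  have e0 : L.getD 0 (0,0) = s.getD n (0,0) := by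
    rw [List.getD_eq_getElem L _ (by omega), List.getD_eq_getElem s _ (by omega)]
    simp [hL, List.getElem_take, List.getElem_drop]
  have e1 : L.getLast hne = s.getD m (0,0) := by
    rw [List.getLast_eq_getElem, List.getD_eq_getElem s _ (by omega)]
    rw [getElem_congr rfl (show L.length - 1 = m - n by omega) (by omega)]
    simp only [hL, List.getElem_take, List.getElem_drop]
    exact getElem_congr rfl (by omega) (by omega)
  rw [e0, e1]

lemma aEnds_last (s : List (Int × Int)) (n : Nat) (hn : n < s.length) :
    aEnds (PySem.List.slice s (some (n:Int)) none) =
      ((s.getD n (0,0)).1, (s.getD (s.length - 1) (0,0)).2) := by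
  rw [aEnds, PySem.List.slice_from_natCast]
  set L := s.drop n with hL
  have hlen : L.length = s.length - n := by simp [hL]
  have hne : L ≠ [] := by intro h; rw [h] at hlen; simp at hlen; omega
  rw [PySem.List.pyGetD_zero, PySem.List.pyGetD_neg_one L (0,0) hne]
  have e0 : L.getD 0 (0,0) = s.getD n (0,0) := by
    rw [List.getD_eq_getElem L _ (by omega), List.getD_eq_getElem s _ (by omega)]
    simp [hL, List.getElem_drop]
  have e1 : L.getLast hne = s.getD (s.length - 1) (0,0) := by
    rw [List.getLast_eq_getElem, List.getD_eq_getElem s _ (by omega)]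
    rw [getElem_congr rfl (show L.length - 1 = s.length - 1 - n by omega) (by omega)]
    simp only [hL, List.getElem_drop]
    exact getElem_congr rfl (by omega) (by omega)
  rw [e0, e1]

lemma aSpanPair_shift (s : List (Int × Int)) (c : Int) (bl' : List Int) (k : Nat) :
    aSpanPair s (c :: bl') ((k:Int) + 1) = aSpanPair s bl' (k:Int) := by
  unfold aSpanPair
  have hidx : PySem.List.pyGetD (c :: bl') ((k:Int) + 1) 0 = PySem.List.pyGetD bl' (k:Int) 0 := by
    rw [show ((k:Int) + 1) = ((k+1 : Nat) : Int) by push_cast; ring,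
        PySem.List.pyGetD_natCast, PySem.List.pyGetD_natCast, List.getD_cons_succ]
  have hidx2 : PySem.List.pyGetD (c :: bl') ((k:Int) + 1 + 1) 0
      = PySem.List.pyGetD bl' ((k:Int) + 1) 0 := by
    rw [show ((k:Int) + 1 + 1) = ((k+2 : Nat) : Int) by push_cast; ring,
        show ((k:Int) + 1) = ((k+1 : Nat) : Int) by push_cast; ring,
        PySem.List.pyGetD_natCast, PySem.List.pyGetD_natCast, List.getD_cons_succ]
  by_cases hk : (k:Int) = (bl'.length : Int) - 1
  · rw [if_pos (by simp; omega), if_pos hk, hidx]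
  · rw [if_neg (by simp; omega), if_neg hk, hidx, hidx2]

lemma aSpan_map (s : List (Int × Int)) :
    ∀ (bs : List Nat) (c : Int) (n : Nat), c + 1 = (n : Int) → n < s.length →
      (∀ b ∈ bs, n ≤ b ∧ b + 1 < s.length) → bs.Pairwise (· < ·) →
      (List.range (bs.length + 1)).map
        (fun (k : Nat) => aSpanPair s (c :: bs.map (fun (b : Nat) => (b : Int))) (k : Int)) = PT s n bs := by
  intro bs
  induction bs with
  | nil =>
    intro c n hc hn _ _
    simp only [List.length_nil, Nat.zero_add, List.range_one, List.map_cons, List.map_nil, PT,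
      Nat.cast_zero]
    unfold aSpanPair
    rw [if_pos (by simp)]
    rw [show PySem.List.pyGetD [c] 0 0 = c from rfl, hc]
    rw [aEnds_last s n hn]
  | cons b bs ih =>
    intro c n hc hn hb hp
    have hblen : b + 1 < s.length := (hb b (by simp)).2
    have hnb : n ≤ b := (hb b (by simp)).1
    simp only [List.length_cons]
    rw [List.range_succ_eq_map, List.map_cons, List.map_map]
    have hhead : aSpanPair s (c :: (b :: bs).map (fun (b : Nat) => (b : Int))) (((0:Nat)):Int)
        = ((s.getD n (0,0)).1, (s.getD b (0,0)).2) := by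
      unfold aSpanPair
      rw [Nat.cast_zero, if_neg (by simp; omega)]
      rw [PySem.List.pyGetD_zero_cons]
      rw [show PySem.List.pyGetD (c :: (b :: bs).map (fun (b : Nat) => (b : Int))) (0 + 1) 0
            = (b : Int) by norm_num [PySem.List.pyGetD_ofNat']]
      rw [hc, aEnds_mid s n b hnb (by omega)]
    rw [Nat.cast_zero] at hhead
    have htail : (List.range (bs.length + 1)).map
          ((fun (k : Nat) => aSpanPair s (c :: (b :: bs).map (fun (b : Nat) => (b : Int))) (k : Int)) ∘ Nat.succ)
        = PT s (b + 1) bs := by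
      rw [show ((fun (k : Nat) => aSpanPair s (c :: (b :: bs).map (fun (b : Nat) => (b : Int))) (k : Int)) ∘ Nat.succ)
            = (fun (k : Nat) => aSpanPair s ((b : Int) :: bs.map (fun (b : Nat) => (b : Int))) (k : Int)) by
          funext k
          simp only [Function.comp, Nat.succ_eq_add_one]
          rw [show ((k + 1 : Nat) : Int) = (k : Int) + 1 by push_cast; ring,
              List.map_cons, aSpanPair_shift]]
      exact ih (b : Int) (b + 1) (by push_cast; ring) hblen
        (fun b' hb' => ⟨by have := (List.pairwise_cons.mp hp).1 b' hb'; omega, (hb b' (by simp [hb'])).2⟩)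
        (List.pairwise_cons.mp hp).2
    simp only [Nat.cast_zero]
    rw [hhead, htail]
    rfl

lemma PT_eq_gR : ∀ (t : List (Int × Int)) (x : Int × Int),
    PT (x :: t) 0 (NB (x :: t)) = gR x t
  | [], x => by
    obtain ⟨a, e⟩ := x
    simp [NB, PT, gR]
  | q :: r, x => by
    obtain ⟨a, e⟩ := x
    rw [NB_cons]
    by_cases hx : e = q.1
    · rw [if_neg (by simp [hx]), List.nil_append,
        PT_zero_shift (NB (q :: r)) (a, e) (q :: r) (by simp)]
      rw [PT_eq_gR r q]
      rw [gR, if_pos hx.symm]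
      rw [show gR (a, q.2) r = setFst a (gR (q.1, q.2) r) from gR_start r a q.1 q.2]
    · rw [if_pos (by simpa using hx), List.cons_append, List.nil_append]
      rw [PT, List.getD_cons_zero]
      rw [show (0 : Nat) + 1 = 0 + 1 from rfl,
        PT_shift (NB (q :: r)) (a, e) (q :: r) 0 (by simp)]
      rw [PT_eq_gR r q, gR, if_neg (fun h => hx h.symm)]

lemma break_idxs_eq (s : List (Int × Int)) :
    (PySem.List.pyRange 0 ((s.length : Int) - 1) 1).foldl
      (fun acc i =>
        if decide ((PySem.List.pyGetD s i (0, 0)).2 ≠ (PySem.List.pyGetD s (i + 1) (0, 0)).1)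
        then acc ++ [i] else acc) []
    = (NB s).map (fun (b : Nat) => (b : Int)) := by
  cases s with
  | nil => rfl
  | cons hd tl =>
  rw [PySem.List.foldl_append_if_eq_filter, List.nil_append]
  rw [show (((hd :: tl).length : Int) - 1) = (((hd :: tl).length - 1 : Nat) : Int) by simp]
  rw [PySem.List.pyRange_zero_natCast, List.filter_map]
  unfold NB
  congr 1
  apply List.filter_congr
  intro i _
  have h2 : PySem.List.pyGetD (hd :: tl) ((i:Int) + 1) (0,0) = (hd :: tl).getD (i+1) (0,0) := by
    rw [show ((i:Int) + 1) = ((i+1 : Nat) : Int) by push_cast; ring, PySem.List.pyGetD_natCast]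
  simp only [Function.comp, PySem.List.pyGetD_natCast, h2, List.getD_eq_getElem?_getD,
    List.getElem?_cons_succ]

-- ===== VERDICT (by name: the statement is the Claim_ definition above) =====
theorem merge_mult_splits_spec : Claim_equal_merge_mult_splits := by
  intro xs _ hpre
  obtain ⟨hne, hadj'⟩ := hpre
  unfold Spec_merge_mult_splits
  have hadj : adj (PySem.List.sorted xs (fun p => p.1) false) := (adj_iff _).mpr hadj'
  unfold merge_mult_splits merge_mult_splits_alt
  cases hs : PySem.List.sorted xs (fun p => p.1) false with
  | nil => exact absurd ((PySem.List.sorted_eq_nil_iff xs (fun p => p.1) false).mp hs) hne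
  | cons p rest =>
    rw [hs] at hadj
    dsimp only
    rw [break_idxs_eq (p :: rest)]
    have hlen : xs.length = rest.length + 1 := by
      have := PySem.List.length_sorted (xs := xs) (key := fun p => p.1) (rev := false)
      rw [hs] at this; simpa using this.symm
    by_cases h1 : xs.length = 1
    · have hrest : rest = [] := by
        cases rest; · rfl
        · simp [hlen] at h1
      subst hrest
      rw [if_pos ⟨by simp [NB], h1⟩]
      obtain ⟨a, e⟩ := p
      simp [altGo]
    · rw [if_neg (by
        rintro ⟨-, hc⟩; exact h1 hc)]
      have hrest : rest ≠ [] := by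
        intro h; rw [h] at hlen; simp at hlen; exact h1 hlen
      rw [PySem.List.foldl_append_singleton_eq_map, List.nil_append]
      rw [show ((((-1:Int) :: (NB (p :: rest)).map (fun (b : Nat) => (b : Int))).length))
            = ((NB (p :: rest)).length + 1) by simp]
      rw [PySem.List.pyRange_zero_natCast, List.map_map]
      rw [altGo_eq rest p.1 p.2 [] (by exact hadj), List.nil_append]
      rw [show ((p.1, p.2) : Int × Int) = p from rfl, ← PT_eq_gR rest p]
      exact aSpan_map (p :: rest) (NB (p :: rest)) (-1) 0 (by norm_num) (by simp)
        (fun b hb => ⟨Nat.zero_le _, NB_bounds _ b hb⟩) (NB_sorted _)
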